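-- pv_equiv track=rewrite | github.com/Ravi-0412/DSA-Program-And-Notes | Sliding  Window/Fixed Size Sliding Window/2653. Sliding Subarray Beauty.py | getSubarrayBeauty
-- ===== SOURCE A (Python) =====
-- from typing import List
--
-- def getSubarrayBeauty(nums: List[int], k: int, x: int) -> List[int]:
--     n= len(nums)
--     freq= [0]*51  # store the freq of "-ve" numbers by taking modulus of that.
--     ans= []
--     i, j= 0, 0
--     while j < n:
--         if nums[j] < 0:
--             freq[abs(nums[j])]+= 1
--         if j- i+ 1 >= k:
--             cnt= 0
--             for num in range(50, 0,-1):
--                 cnt+= freq[num]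
--                 if cnt >= x:
--                     ans.append(-num)
--                     break
--             if cnt < x :
--                 ans.append(0)
--             if nums[i] < 0:
--                 freq[abs(nums[i])]-= 1
--             i+= 1
--
--         j+= 1
--     return ans
-- ===== SOURCE B (Python) =====
-- from typing import List
--
-- def getSubarrayBeauty(nums: List[int], k: int, x: int) -> List[int]:
--     ans = []
--     for i in range(len(nums) - k + 1):
--         negs = sorted(v for v in nums[i:i+k] if v < 0)
--         ans.append(negs[x-1] if 1 <= x <= len(negs) else 0)
--     return ans
-- ===== Notes on version B (the rewrite author's own statement) =====
-- stated objective: simpler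
-- what changed: Replaced the incremental 51-slot frequency array with its sliding add/remove updates and descending counting scan by a direct per-window pass: slice the window, sort its negative values and pick the (x-1)-th when the rank 1 <= x <= len(negs) is valid, else 0.
-- intended difference: On non-positive x with at least one full window (1 <= k <= len(nums)) A's 'cnt >= x' test fires on the very first scan step and it returns -50 for every window regardless of its contents, while B returns 0, the value used everywhere else for 'no such element' — the intended answer for an invalid rank. — e.g. on getSubarrayBeauty([-3], 1, 0): A returns [-50], B returns [0]
-- outside the precondition, e.g. on getSubarrayBeauty([1, 2], 0, 1): A returns [0, 0], B returns [0, 0, 0]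
import Mathlib
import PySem

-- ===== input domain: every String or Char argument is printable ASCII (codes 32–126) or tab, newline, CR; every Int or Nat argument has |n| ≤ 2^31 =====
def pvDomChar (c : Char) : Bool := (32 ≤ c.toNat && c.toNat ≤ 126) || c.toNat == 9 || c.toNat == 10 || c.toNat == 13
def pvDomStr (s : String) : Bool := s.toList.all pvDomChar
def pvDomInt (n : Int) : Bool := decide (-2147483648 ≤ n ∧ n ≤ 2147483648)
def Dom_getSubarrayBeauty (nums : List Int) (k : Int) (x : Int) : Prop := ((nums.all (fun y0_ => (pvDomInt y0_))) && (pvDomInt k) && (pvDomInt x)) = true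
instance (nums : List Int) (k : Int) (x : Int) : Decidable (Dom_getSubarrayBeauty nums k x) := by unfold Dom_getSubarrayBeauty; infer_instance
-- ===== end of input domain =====

-- B replaces A's sliding 51-slot frequency array and descending counting scan by a
-- per-window collect-sort-select pass (objective: simpler).

-- ===== PORT A =====
-- freq[idx] += delta  (Python raises IndexError when idx is out of range; such inputs
-- — an element below -50 — are excluded by Pre_, where this helper leaves the list unchanged)
def bumpA (l : List Int) (idx delta : Int) : List Int :=
  match PySem.List.pyGet? l idx with
  | some v => PySem.List.pySetD l idx (v + delta)
  | none => l

-- the inner 'for num in range(50, 0, -1)' loop: returns (cnt, some appended value on break | none)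
def aScan (freq : List Int) (x : Int) : List Int → Int → Int × Option Int
  | [], cnt => (cnt, none)
  | num :: rest, cnt =>
      let cnt' := cnt + PySem.List.pyGetD freq num 0   -- freq[num]: num ∈ 1..50 < 51 = len(freq), in range
      if cnt' ≥ x then (cnt', some (-num)) else aScan freq x rest cnt'

-- one iteration of the while loop (state = (freq, ans, i)); nums[j] / nums[i] are in range when read
def aStep (nums : List Int) (k x : Int) (s : List Int × List Int × Int) (j : Int) :
    List Int × List Int × Int :=
  let freq := s.1; let ans := s.2.1; let i := s.2.2
  let nj := PySem.List.pyGetD nums j 0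
  let freq := if nj < 0 then bumpA freq |nj| 1 else freq
  if j - i + 1 ≥ k then
    let r := aScan freq x (PySem.List.pyRange 50 0 (-1)) 0
    let ans := match r.2 with | some v => ans ++ [v] | none => ans
    let ans := if r.1 < x then ans ++ [0] else ans
    let ni := PySem.List.pyGetD nums i 0
    let freq := if ni < 0 then bumpA freq |ni| (-1) else freq
    (freq, ans, i + 1)
  else (freq, ans, i)

def getSubarrayBeauty (nums : List Int) (k : Int) (x : Int) : List Int :=
  let n : Int := nums.length
  ((PySem.List.pyRange 0 n 1).foldl (aStep nums k x) (List.replicate 51 0, [], 0)).2.1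

-- ===== PORT B =====
def getSubarrayBeauty_alt (nums : List Int) (k : Int) (x : Int) : List Int :=
  let n : Int := nums.length
  (PySem.List.pyRange 0 (n - k + 1) 1).foldl (fun ans i =>
    let negs := PySem.List.sorted ((PySem.List.slice nums (some i) (some (i + k))).filter
                  (fun v => decide (v < 0))) (fun v => v) false
    ans ++ [if 1 ≤ x ∧ x ≤ (negs.length : Int) then PySem.List.pyGetD negs (x - 1) 0 else 0]) []

-- ===== PRECONDITION & SPEC =====
-- Pre_ excludes: elements below -50, on which A raises IndexError; and the degenerate k ≤ 0,
-- on which A's window condition fires on every single index (one output per element) while B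
-- naturally has len(nums)-k+1 window starts, so no reading of 'windows of size k' matches both.
def Pre_getSubarrayBeauty (nums : List Int) (k : Int) (x : Int) : Prop :=
  (∀ v ∈ nums, -50 ≤ v) ∧ 1 ≤ k
instance (nums : List Int) (k : Int) (x : Int) : Decidable (Pre_getSubarrayBeauty nums k x) := by
  unfold Pre_getSubarrayBeauty; infer_instance

def pvWitness_getSubarrayBeauty : List Int × Int × Int := ([-3, 1, -2], 2, 1)

-- On non-positive x with at least one full window (1 ≤ k ≤ len(nums)) A's 'cnt >= x' test fires
-- on the very first scan step and it returns -50 for every window regardless of its contents,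
-- while B returns 0, the value used everywhere else for 'no such element' — the intended answer
-- for an invalid rank.
def D_getSubarrayBeauty (nums : List Int) (k : Int) (x : Int) : Prop :=
  x ≤ 0 ∧ 1 ≤ k ∧ k ≤ (nums.length : Int)
instance (nums : List Int) (k : Int) (x : Int) : Decidable (D_getSubarrayBeauty nums k x) := by
  unfold D_getSubarrayBeauty; infer_instance

def Spec_getSubarrayBeauty (nums : List Int) (k : Int) (x : Int) (out : List Int) : Prop := ¬ D_getSubarrayBeauty nums k x → out = getSubarrayBeauty_alt nums k x
instance (nums : List Int) (k : Int) (x : Int) (out : List Int) : Decidable (Spec_getSubarrayBeauty nums k x out) := by unfold Spec_getSubarrayBeauty; infer_instance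

def pvDiffWitness_getSubarrayBeauty : List Int × Int × Int := ([-3], 1, 0)
def pvDiffWitnessOut_getSubarrayBeauty : (List Int) × (List Int) := ([-50], [0])

-- ===== CLAIM (what is proved, stated in full; the proofs are below) =====
def Claim_unchanged_getSubarrayBeauty : Prop := ∀ (nums : List Int) (k : Int) (x : Int), Dom_getSubarrayBeauty nums k x → Pre_getSubarrayBeauty nums k x → Spec_getSubarrayBeauty nums k x (getSubarrayBeauty nums k x)
def Claim_changed_getSubarrayBeauty : Prop := Dom_getSubarrayBeauty (pvDiffWitness_getSubarrayBeauty.1) (pvDiffWitness_getSubarrayBeauty.2.1) (pvDiffWitness_getSubarrayBeauty.2.2) ∧ Pre_getSubarrayBeauty (pvDiffWitness_getSubarrayBeauty.1) (pvDiffWitness_getSubarrayBeauty.2.1) (pvDiffWitness_getSubarrayBeauty.2.2) ∧ D_getSubarrayBeauty (pvDiffWitness_getSubarrayBeauty.1) (pvDiffWitness_getSubarrayBeauty.2.1) (pvDiffWitness_getSubarrayBeauty.2.2) ∧ getSubarrayBeauty (pvDiffWitness_getSubarrayBeauty.1) (pvDiffWitness_getSubarrayBeauty.2.1) (pvDiffWitness_getSubarrayBeauty.2.2)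 = pvDiffWitnessOut_getSubarrayBeauty.1 ∧ getSubarrayBeauty_alt (pvDiffWitness_getSubarrayBeauty.1) (pvDiffWitness_getSubarrayBeauty.2.1) (pvDiffWitness_getSubarrayBeauty.2.2) = pvDiffWitnessOut_getSubarrayBeauty.2 ∧ pvDiffWitnessOut_getSubarrayBeauty.1 ≠ pvDiffWitnessOut_getSubarrayBeauty.2
def Claim_exact_getSubarrayBeauty : Prop := ∀ (nums : List Int) (k : Int) (x : Int), Dom_getSubarrayBeauty nums k x → Pre_getSubarrayBeauty nums k x → D_getSubarrayBeauty nums k x → getSubarrayBeauty nums k x ≠ getSubarrayBeauty_alt nums k x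

-- ===== LEMMAS AND PROOFS =====

-- the sorted list of negatives of a window, and B's per-window value
def negsOf (w : List Int) : List Int :=
  PySem.List.sorted (w.filter (fun v => decide (v < 0))) (fun v => v) false

def winVal (x : Int) (w : List Int) : Int :=
  if 1 ≤ x ∧ x ≤ ((negsOf w).length : Int) then PySem.List.pyGetD (negsOf w) (x - 1) 0 else 0

-- the frequency array A maintains, expressed as a function of the current window
def freqList (w : List Int) : List Int :=
  (List.range 51).map (fun m => (w.countP (fun v => decide (v < 0 ∧ v = -(m : Int))) : Int))

theorem freqList_length (w : List Int) : (freqList w).length = 51 := by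
  simp [freqList]

theorem freqList_getD (w : List Int) (m : Nat) (hm : m < 51) :
    (freqList w).getD m 0 =
      (w.countP (fun v => decide (v < 0 ∧ v = -(m : Int))) : Int) := by
  unfold freqList
  rw [List.getD_eq_getElem _ _ (by simpa using hm), List.getElem_map]
  simp [← List.map_eq_flatMap]

theorem freqList_getElem (w : List Int) (m : Nat) (hm : m < 51) :
    (freqList w)[m]'(by simp [freqList_length, hm]) =
      (w.countP (fun v => decide (v < 0 ∧ v = -(m : Int))) : Int) := by
  have h := freqList_getD w m hm
  rwa [List.getD_eq_getElem _ _ (by simp [freqList_length, hm])] at h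

-- appending an element on the right updates freqList the way A's j-step does
theorem count_singleton_eq (a : Int) (m : Nat) (h : a < 0) (hma : (m : Int) = -a) :
    [a].countP (fun v => decide (v < 0 ∧ v = -(m : Int))) = 1 := by
  simp [List.countP_cons]
  constructor <;> omega

theorem count_singleton_ne (a : Int) (m : Nat) (hma : ¬ ((m : Int) = -a) ∨ ¬ a < 0) :
    [a].countP (fun v => decide (v < 0 ∧ v = -(m : Int))) = 0 := by
  simp [List.countP_cons]
  intro h1 h2
  omega

theorem freq_add (W : List Int) (a : Int) (ha : -50 ≤ a) :
    (if a < 0 then bumpA (freqList W) |a| 1 else freqList W) = freqList (W ++ [a]) := by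
  by_cases h : a < 0
  · rw [if_pos h, abs_of_neg h]
    have ht0 : (0 : Int) ≤ -a := by omega
    have ht51 : -a < ((freqList W).length : Int) := by rw [freqList_length]; omega
    unfold bumpA
    rw [PySem.List.pyGet?_eq_some_getElem _ ht0 ht51]
    dsimp only
    rw [PySem.List.pySetD_of_nonneg _ _ ht0]
    apply List.ext_getElem
    · simp [freqList_length]
    · intro m hm1 hm2
      have hm : m < 51 := by simpa [freqList_length] using hm2
      rw [List.getElem_set]
      rw [freqList_getElem (W ++ [a]) m hm, List.countP_append]
      by_cases hmt : (-a).toNat = m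
      · subst hmt
        rw [if_pos rfl]
        rw [count_singleton_eq a (-a).toNat h (by omega)]
        rw [freqList_getElem W (-a).toNat (by omega)]
        push_cast
        ring
      · rw [if_neg hmt]
        rw [count_singleton_ne a m (Or.inl (by omega))]
        rw [freqList_getElem W m hm]
        simp
  · rw [if_neg h]
    apply List.ext_getElem
    · simp [freqList_length]
    · intro m hm1 hm2
      have hm : m < 51 := by simpa [freqList_length] using hm1
      rw [freqList_getElem W m hm, freqList_getElem (W ++ [a]) m hm]
      rw [List.countP_append, count_singleton_ne a m (Or.inr h)]
      simp

-- removing the left element updates freqList the way A's i-step does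
theorem freq_sub (W : List Int) (a : Int) (ha : -50 ≤ a) :
    (if a < 0 then bumpA (freqList (a :: W)) |a| (-1) else freqList (a :: W)) = freqList W := by
  have hcons : ∀ m : Nat, (a :: W).countP (fun v => decide (v < 0 ∧ v = -(m : Int))) =
      [a].countP (fun v => decide (v < 0 ∧ v = -(m : Int))) +
        W.countP (fun v => decide (v < 0 ∧ v = -(m : Int))) := by
    intro m
    rw [show (a :: W) = [a] ++ W from rfl, List.countP_append]
  by_cases h : a < 0
  · rw [if_pos h, abs_of_neg h]
    have ht0 : (0 : Int) ≤ -a := by omega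
    have ht51 : -a < ((freqList (a :: W)).length : Int) := by rw [freqList_length]; omega
    unfold bumpA
    rw [PySem.List.pyGet?_eq_some_getElem _ ht0 ht51]
    dsimp only
    rw [PySem.List.pySetD_of_nonneg _ _ ht0]
    apply List.ext_getElem
    · simp [freqList_length]
    · intro m hm1 hm2
      have hm : m < 51 := by simpa [freqList_length] using hm2
      rw [List.getElem_set]
      rw [freqList_getElem W m hm]
      by_cases hmt : (-a).toNat = m
      · subst hmt
        rw [if_pos rfl]
        rw [freqList_getElem (a :: W) (-a).toNat (by omega)]
        rw [hcons (-a).toNat, count_singleton_eq a (-a).toNat h (by omega)]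
        push_cast
        ring
      · rw [if_neg hmt]
        rw [freqList_getElem (a :: W) m hm, hcons m, count_singleton_ne a m (Or.inl (by omega))]
        simp
  · rw [if_neg h]
    apply List.ext_getElem
    · simp [freqList_length]
    · intro m hm1 hm2
      have hm : m < 51 := by simpa [freqList_length] using hm1
      rw [freqList_getElem W m hm, freqList_getElem (a :: W) m hm]
      rw [hcons m, count_singleton_ne a m (Or.inr h)]
      simp

-- position in a sorted list from counts
theorem sorted_getElem?_of_counts (s : List Int) (hs : s.Pairwise (· ≤ ·)) (t : Int) :
    ∀ (j : Nat), s.countP (fun v => decide (v < t)) ≤ j →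
      j < s.countP (fun v => decide (v ≤ t)) → s[j]? = some t := by
  induction s with
  | nil => intro j _ h2; simp at h2
  | cons h tl ih =>
    intro j h1 h2
    have hrel : ∀ v ∈ tl, h ≤ v := (List.pairwise_cons.mp hs).1
    have hs' : tl.Pairwise (· ≤ ·) := (List.pairwise_cons.mp hs).2
    rw [List.countP_cons] at h1 h2
    cases j with
    | zero =>
      have hht : h ≤ t := by
        by_contra hgt
        have hz : tl.countP (fun v => decide (v ≤ t)) = 0 := by
          rw [List.countP_eq_zero]
          intro v hv
          have := hrel v hv
          simp
          omega
        rw [hz] at h2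
        split_ifs at h2 with hc
        · simp at hc; omega
        · omega
      have hht2 : ¬ h < t := by
        intro hlt
        split_ifs at h1 with hc
        · omega
        · simp at hc; omega
      have : h = t := by omega
      simp [this]
    | succ j' =>
      simp only [List.getElem?_cons_succ]
      apply ih hs' j'
      · by_cases hlt : h < t
        · split_ifs at h1 with hc
          · omega
          · simp at hc; omega
        · have hz : tl.countP (fun v => decide (v < t)) = 0 := by
            rw [List.countP_eq_zero]
            intro v hv
            have := hrel v hv
            simp
            omega
          omega
      · split_ifs at h2 <;> omega

-- splitting a ≤-count at an exact value (integers)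
theorem countP_le_split (l : List Int) (b : Int) :
    l.countP (fun v => decide (v ≤ b)) =
      l.countP (fun v => decide (v ≤ b - 1)) + l.countP (fun v => decide (v = b)) := by
  induction l with
  | nil => simp
  | cons a tl ih =>
    simp only [List.countP_cons, ih]
    split_ifs with hc1 hc2 hc3 <;> simp_all <;> omega

theorem negsOf_pairwise (W : List Int) : (negsOf W).Pairwise (· ≤ ·) := by
  simpa using PySem.List.sorted_pairwise (xs := W.filter (fun v => decide (v < 0)))
    (key := fun v => v)

theorem negsOf_count_eq (W : List Int) (m : Nat) :
    (negsOf W).countP (fun v => decide (v = -(m : Int))) =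
      W.countP (fun v => decide (v < 0 ∧ v = -(m : Int))) := by
  unfold negsOf
  rw [List.Perm.countP_eq _ (PySem.List.sorted_perm _ _ _)]
  rw [List.countP_filter]
  apply List.countP_congr
  intro v _
  simp [Bool.and_comm]

theorem countP_le_bound_congr (l : List Int) {b b' : Int} (h : b = b') :
    l.countP (fun v => decide (v ≤ b)) = l.countP (fun v => decide (v ≤ b')) := by rw [h]

theorem countP_eq_bound_congr (l : List Int) {b b' : Int} (h : b = b') :
    l.countP (fun v => decide (v = b)) = l.countP (fun v => decide (v = b')) := by rw [h]

theorem countP_lt_eq (l : List Int) (t : Int) :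
    l.countP (fun v => decide (v < t)) = l.countP (fun v => decide (v ≤ t - 1)) := by
  apply List.countP_congr
  intro v _
  simp only [decide_eq_true_eq]
  omega

theorem negsOf_mem_lb (W : List Int) (hW : ∀ v ∈ W, -50 ≤ v) :
    ∀ v ∈ negsOf W, -50 ≤ v ∧ v < 0 := by
  intro v hv
  rw [negsOf, PySem.List.mem_sorted, List.mem_filter] at hv
  exact ⟨hW v hv.1, by simpa using hv.2⟩

-- the descending counting scan computes B's select on the sorted negatives
theorem aScan_spec (W : List Int) (x : Int) (hW : ∀ v ∈ W, -50 ≤ v) (hx : 1 ≤ x) :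
    ∀ (m : Nat) (c : Int), m ≤ 50 →
      c = ((negsOf W).countP (fun v => decide (v ≤ -((m : Int) + 1))) : Int) → c < x →
      (((negsOf W).length : Int) ≥ x →
          (aScan (freqList W) x (PySem.List.pyRange (m : Int) 0 (-1)) c).2 =
            some (PySem.List.pyGetD (negsOf W) (x - 1) 0) ∧
          x ≤ (aScan (freqList W) x (PySem.List.pyRange (m : Int) 0 (-1)) c).1) ∧
      (((negsOf W).length : Int) < x →
          aScan (freqList W) x (PySem.List.pyRange (m : Int) 0 (-1)) c =
            (((negsOf W).length : Int), none)) := by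
  intro m
  induction m with
  | zero =>
    intro c _ hc hcx
    rw [show ((0:Nat) : Int) = 0 from rfl, PySem.List.pyRange_neg_one_eq_nil (le_refl 0)]
    simp only [aScan]
    have hceq : c = ((negsOf W).length : Int) := by
      rw [hc]
      norm_cast
      rw [List.countP_eq_length]
      intro v hv
      have := negsOf_mem_lb W hW v hv
      simp
      omega
    constructor
    · intro hge
      exfalso
      omega
    · intro _
      rw [hceq]
  | succ m ihm =>
    intro c hm hc hcx
    have hm' : m ≤ 50 := by omega
    have hpos : (0 : Int) < ((m+1 : Nat) : Int) := by positivity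
    rw [PySem.List.pyRange_neg_one_cons hpos]
    have hc1 : ((m+1 : Nat) : Int) - 1 = (m : Int) := by push_cast; ring
    rw [hc1]
    simp only [aScan]
    have hfq : PySem.List.pyGetD (freqList W) ((m+1 : Nat) : Int) 0 =
        (W.countP (fun v => decide (v < 0 ∧ v = -((m+1 : Nat) : Int))) : Int) := by
      rw [PySem.List.pyGetD_natCast]
      exact freqList_getD W (m+1) (by omega)
    rw [hfq]
    -- the accumulated count after adding freq[m+1]
    have hkey : c + (W.countP (fun v => decide (v < 0 ∧ v = -((m+1 : Nat) : Int))) : Int) =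
        (((negsOf W).countP (fun v => decide (v ≤ -((m : Int) + 1)))) : Int) := by
      rw [hc, countP_le_split (negsOf W) (-((m : Int) + 1))]
      rw [countP_le_bound_congr (negsOf W)
        (show -((m : Int) + 1) - 1 = -(((m+1 : Nat) : Int) + 1) by push_cast; ring)]
      rw [countP_eq_bound_congr (negsOf W)
        (show -((m : Int) + 1) = -((m+1 : Nat) : Int) by push_cast; ring)]
      rw [negsOf_count_eq W (m+1)]
      push_cast
      ring
    by_cases hge : c + (W.countP (fun v => decide (v < 0 ∧ v = -((m+1 : Nat) : Int))) : Int) ≥ x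
    · rw [if_pos hge]
      have hcle : (negsOf W).countP (fun v => decide (v ≤ -((m : Int) + 1))) ≤
          (negsOf W).length := List.countP_le_length
      have hlenge : x ≤ ((negsOf W).length : Int) := by omega
      constructor
      · intro _
        refine ⟨?_, by omega⟩
        -- the value appended at the break is the (x-1)-th sorted negative
        have h1 : (negsOf W).countP (fun v => decide (v < -((m+1 : Nat) : Int))) ≤
            (x - 1).toNat := by
          rw [countP_lt_eq, countP_le_bound_congr (negsOf W)
            (show -((m+1 : Nat) : Int) - 1 = -(((m+1 : Nat) : Int) + 1) by ring)]
          omega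
        have h2 : (x - 1).toNat <
            (negsOf W).countP (fun v => decide (v ≤ -((m+1 : Nat) : Int))) := by
          rw [countP_le_bound_congr (negsOf W)
            (show -((m+1 : Nat) : Int) = -((m : Int) + 1) by push_cast; ring)]
          omega
        have hj := sorted_getElem?_of_counts (negsOf W) (negsOf_pairwise W)
          (-((m+1 : Nat) : Int)) (x - 1).toNat h1 h2
        have hx1 : (0 : Int) ≤ x - 1 := by omega
        have hx2 : x - 1 < ((negsOf W).length : Int) := by omega
        rw [PySem.List.pyGetD_eq_getElem _ _ hx1 hx2]
        rw [List.getElem?_eq_getElem (by omega)] at hj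
        simp only [Option.some.injEq] at hj ⊢
        omega
      · intro hlt
        omega
    · rw [if_neg hge]
      exact ihm _ hm' hkey (by omega)

-- the main sliding-window invariant
theorem loopA_spec (nums : List Int) (k x : Int)
    (hneg : ∀ v ∈ nums, -50 ≤ v) (hk : 1 ≤ k) (hx : 1 ≤ x) :
    ∀ (d j : Nat) (i : Int) (ans : List Int), j + d = nums.length →
      i = max 0 ((j : Int) - k + 1) →
      (((PySem.List.pyRange (j : Int) (nums.length : Int) 1).foldl (aStep nums k x)
        (freqList ((nums.drop i.toNat).take (j - i.toNat)), ans, i))).2.1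
      = ans ++ (PySem.List.pyRange i ((nums.length : Int) - k + 1) 1).map
          (fun s => winVal x (PySem.List.slice nums (some s) (some (s + k)))) := by
  intro d
  induction d with
  | zero =>
    intro j i ans hj hi
    have hjn : j = nums.length := by omega
    subst hjn
    rw [PySem.List.pyRange_one_eq_nil (le_refl _)]
    rw [PySem.List.pyRange_one_eq_nil (by omega : (nums.length : Int) - k + 1 ≤ i)]
    simp
  | succ d ih =>
    intro j i ans hj hi
    have hjn : j < nums.length := by omega
    have hjlt : (j : Int) < (nums.length : Int) := by exact_mod_cast hjn
    have hi0 : 0 ≤ i := by omega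
    have hij : i ≤ (j : Int) := by omega
    have hitle : i.toNat ≤ j := by omega
    rw [PySem.List.pyRange_one_cons hjlt]
    rw [List.foldl_cons]
    simp only [aStep]
    have hnj : PySem.List.pyGetD nums ((j : Nat) : Int) 0 = nums[j] := by
      rw [PySem.List.pyGetD_natCast]
      exact List.getD_eq_getElem nums 0 hjn
    rw [hnj]
    rw [freq_add _ nums[j] (hneg _ (List.getElem_mem hjn))]
    have hWext : (nums.drop i.toNat).take (j - i.toNat) ++ [nums[j]] =
        (nums.drop i.toNat).take (j + 1 - i.toNat) := by
      have hlt : j - i.toNat < (nums.drop i.toNat).length := by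
        rw [List.length_drop]; omega
      rw [show j + 1 - i.toNat = (j - i.toNat) + 1 from by omega, List.take_add_one]
      congr 1
      rw [List.getElem?_drop, show i.toNat + (j - i.toNat) = j from by omega,
        List.getElem?_eq_getElem hjn]
      rfl
    rw [hWext]
    by_cases hfull : (j : Int) - i + 1 ≥ k
    · rw [if_pos hfull]
      have hik : i = (j : Int) - k + 1 := by omega
      have hi_lt : i.toNat < nums.length := by omega
      -- the full window and its aScan result
      have hWfmem : ∀ v ∈ (nums.drop i.toNat).take (j + 1 - i.toNat), -50 ≤ v :=
        fun v hv => hneg v (List.mem_of_mem_drop (List.mem_of_mem_take hv))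
      have hc0 : (0 : Int) =
          (((negsOf ((nums.drop i.toNat).take (j + 1 - i.toNat))).countP
            (fun v => decide (v ≤ -(((50:Nat) : Int) + 1)))) : Int) := by
        have : (negsOf ((nums.drop i.toNat).take (j + 1 - i.toNat))).countP
            (fun v => decide (v ≤ -(((50:Nat) : Int) + 1))) = 0 := by
          rw [List.countP_eq_zero]
          intro v hv
          have := negsOf_mem_lb _ hWfmem v hv
          simp
          omega
        rw [this]
        rfl
      have h50 := aScan_spec ((nums.drop i.toNat).take (j + 1 - i.toNat)) x hWfmem hx
        50 0 (le_refl 50) hc0 (by omega)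
      rw [show (((50:Nat)) : Int) = (50 : Int) from by norm_num] at h50
      -- the slice B takes is the same window
      have hslice : PySem.List.slice nums (some i) (some (i + k)) =
          (nums.drop i.toNat).take (j + 1 - i.toNat) := by
        rw [PySem.List.slice_toNat nums hi0 (by omega : (0:Int) ≤ i + k)]
        rw [show (i + k).toNat - i.toNat = j + 1 - i.toNat from by omega]
      -- peeling the emitted window start from the remaining starts
      have hrange : PySem.List.pyRange i ((nums.length : Int) - k + 1) 1 =
          i :: PySem.List.pyRange (i + 1) ((nums.length : Int) - k + 1) 1 :=
        PySem.List.pyRange_one_cons (by omega)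
      -- the freq update that drops nums[i]
      have hdrops : nums.drop i.toNat = nums[i.toNat] :: nums.drop (i.toNat + 1) :=
        List.drop_eq_getElem_cons hi_lt
      have htail : (nums.drop i.toNat).take (j + 1 - i.toNat) =
          nums[i.toNat] :: (nums.drop (i.toNat + 1)).take (j - i.toNat) := by
        rw [hdrops, show j + 1 - i.toNat = (j - i.toNat) + 1 from by omega,
          List.take_succ_cons]
      have hni : PySem.List.pyGetD nums i 0 = nums[i.toNat] :=
        PySem.List.pyGetD_eq_getElem nums 0 hi0 (by omega)
      have hfreqsub : (if PySem.List.pyGetD nums i 0 < 0 then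
            bumpA (freqList ((nums.drop i.toNat).take (j + 1 - i.toNat)))
              |PySem.List.pyGetD nums i 0| (-1)
          else freqList ((nums.drop i.toNat).take (j + 1 - i.toNat)))
          = freqList ((nums.drop (i.toNat + 1)).take (j - i.toNat)) := by
        rw [hni, htail]
        exact freq_sub _ _ (hneg _ (List.getElem_mem hi_lt))
      have hihpre : i + 1 = max 0 (((j + 1 : Nat) : Int) - k + 1) := by push_cast; omega
      by_cases hlen :
          (((negsOf ((nums.drop i.toNat).take (j + 1 - i.toNat))).length : Int)) ≥ x
      · obtain ⟨h2, h1⟩ := h50.1 hlen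
        rw [h2]
        have hnlt : ¬ (aScan (freqList ((nums.drop i.toNat).take (j + 1 - i.toNat))) x
            (PySem.List.pyRange 50 0 (-1)) 0).1 < x := by omega
        rw [if_neg hnlt]
        dsimp only
        rw [hfreqsub]
        have happ := ih (j + 1) (i + 1)
          (ans ++ [PySem.List.pyGetD
            (negsOf ((nums.drop i.toNat).take (j + 1 - i.toNat))) (x - 1) 0])
          (by omega) hihpre
        rw [show ((i : Int) + 1).toNat = i.toNat + 1 from by omega,
          show (j + 1) - (i.toNat + 1) = j - i.toNat from by omega,
          show (((j + 1 : Nat)) : Int) = (j : Int) + 1 from by push_cast; ring] at happ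
        rw [happ, hrange]
        rw [List.map_cons]
        rw [show winVal x (PySem.List.slice nums (some i) (some (i + k))) =
            PySem.List.pyGetD (negsOf ((nums.drop i.toNat).take (j + 1 - i.toNat)))
              (x - 1) 0 from by rw [winVal, hslice]; exact if_pos ⟨hx, by omega⟩]
        simp
      · have h3 := h50.2 (by omega)
        rw [h3]
        dsimp only
        rw [if_pos (show (((negsOf ((nums.drop i.toNat).take (j + 1 - i.toNat))).length : Int))
          < x from by omega)]
        rw [hfreqsub]
        have happ := ih (j + 1) (i + 1) (ans ++ [(0 : Int)]) (by omega) hihpre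
        rw [show ((i : Int) + 1).toNat = i.toNat + 1 from by omega,
          show (j + 1) - (i.toNat + 1) = j - i.toNat from by omega,
          show (((j + 1 : Nat)) : Int) = (j : Int) + 1 from by push_cast; ring] at happ
        rw [happ, hrange]
        rw [List.map_cons]
        rw [show winVal x (PySem.List.slice nums (some i) (some (i + k))) = (0 : Int)
          from by rw [winVal, hslice]; exact if_neg (by omega)]
        simp
    · rw [if_neg hfull]
      have happ := ih (j + 1) i ans (by omega) (by push_cast; omega)
      rw [show (((j + 1 : Nat)) : Int) = (j : Int) + 1 from by push_cast; ring] at happ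
      exact happ

-- with a non-positive x the counting scan breaks at its first step: every window yields -50
theorem loopA_spec_xneg (nums : List Int) (k x : Int)
    (hneg : ∀ v ∈ nums, -50 ≤ v) (hk : 1 ≤ k) (hx : x ≤ 0) :
    ∀ (d j : Nat) (i : Int) (ans : List Int), j + d = nums.length →
      i = max 0 ((j : Int) - k + 1) →
      (((PySem.List.pyRange (j : Int) (nums.length : Int) 1).foldl (aStep nums k x)
        (freqList ((nums.drop i.toNat).take (j - i.toNat)), ans, i))).2.1
      = ans ++ (PySem.List.pyRange i ((nums.length : Int) - k + 1) 1).map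
          (fun _ => (-50 : Int)) := by
  intro d
  induction d with
  | zero =>
    intro j i ans hj hi
    have hjn : j = nums.length := by omega
    subst hjn
    rw [PySem.List.pyRange_one_eq_nil (le_refl _)]
    rw [PySem.List.pyRange_one_eq_nil (by omega : (nums.length : Int) - k + 1 ≤ i)]
    simp
  | succ d ih =>
    intro j i ans hj hi
    have hjn : j < nums.length := by omega
    have hjlt : (j : Int) < (nums.length : Int) := by exact_mod_cast hjn
    have hi0 : 0 ≤ i := by omega
    have hitle : i.toNat ≤ j := by omega
    rw [PySem.List.pyRange_one_cons hjlt]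
    rw [List.foldl_cons]
    simp only [aStep]
    have hnj : PySem.List.pyGetD nums ((j : Nat) : Int) 0 = nums[j] := by
      rw [PySem.List.pyGetD_natCast]
      exact List.getD_eq_getElem nums 0 hjn
    rw [hnj]
    rw [freq_add _ nums[j] (hneg _ (List.getElem_mem hjn))]
    have hWext : (nums.drop i.toNat).take (j - i.toNat) ++ [nums[j]] =
        (nums.drop i.toNat).take (j + 1 - i.toNat) := by
      rw [show j + 1 - i.toNat = (j - i.toNat) + 1 from by omega, List.take_add_one]
      congr 1
      rw [List.getElem?_drop, show i.toNat + (j - i.toNat) = j from by omega,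
        List.getElem?_eq_getElem hjn]
      rfl
    rw [hWext]
    by_cases hfull : (j : Int) - i + 1 ≥ k
    · rw [if_pos hfull]
      have hik : i = (j : Int) - k + 1 := by omega
      have hi_lt : i.toNat < nums.length := by omega
      -- the scan breaks at num = 50 because cnt = freq[50] ≥ 0 ≥ x
      have hsc : aScan (freqList ((nums.drop i.toNat).take (j + 1 - i.toNat))) x
          (PySem.List.pyRange 50 0 (-1)) 0 =
          (0 + (((nums.drop i.toNat).take (j + 1 - i.toNat)).countP
              (fun v => decide (v < 0 ∧ v = -((50 : Nat) : Int))) : Int),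
            some (-(50 : Int))) := by
        rw [PySem.List.pyRange_neg_one_cons (by norm_num : (0:Int) < 50)]
        simp only [aScan]
        rw [show ((50 : Int)) = ((50 : Nat) : Int) from by norm_num,
          PySem.List.pyGetD_natCast, freqList_getD _ 50 (by omega)]
        rw [if_pos (show 0 + ((((nums.drop i.toNat).take (j + 1 - i.toNat)).countP
          (fun v => decide (v < 0 ∧ v = -((50 : Nat) : Int)))) : Int) ≥ x from by omega)]
      rw [hsc]
      dsimp only
      rw [if_neg (show ¬ (0 + ((((nums.drop i.toNat).take (j + 1 - i.toNat)).countP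
        (fun v => decide (v < 0 ∧ v = -((50 : Nat) : Int)))) : Int) < x) from by omega)]
      have hdrops : nums.drop i.toNat = nums[i.toNat] :: nums.drop (i.toNat + 1) :=
        List.drop_eq_getElem_cons hi_lt
      have htail : (nums.drop i.toNat).take (j + 1 - i.toNat) =
          nums[i.toNat] :: (nums.drop (i.toNat + 1)).take (j - i.toNat) := by
        rw [hdrops, show j + 1 - i.toNat = (j - i.toNat) + 1 from by omega,
          List.take_succ_cons]
      have hni : PySem.List.pyGetD nums i 0 = nums[i.toNat] :=
        PySem.List.pyGetD_eq_getElem nums 0 hi0 (by omega)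
      rw [hni, htail, freq_sub _ _ (hneg _ (List.getElem_mem hi_lt))]
      have happ := ih (j + 1) (i + 1) (ans ++ [(-50 : Int)]) (by omega)
        (by push_cast; omega)
      rw [show ((i : Int) + 1).toNat = i.toNat + 1 from by omega,
        show (j + 1) - (i.toNat + 1) = j - i.toNat from by omega,
        show (((j + 1 : Nat)) : Int) = (j : Int) + 1 from by push_cast; ring] at happ
      rw [happ]
      rw [PySem.List.pyRange_one_cons (by omega : i < (nums.length : Int) - k + 1)]
      simp
    · rw [if_neg hfull]
      have happ := ih (j + 1) i ans (by omega) (by push_cast; omega)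
      rw [show (((j + 1 : Nat)) : Int) = (j : Int) + 1 from by push_cast; ring] at happ
      exact happ

-- with k larger than the list no window ever completes and A appends nothing
theorem loopA_notfull (nums : List Int) (k x : Int) (hnk : (nums.length : Int) < k) :
    ∀ (d j : Nat) (freq ans : List Int), j + d = nums.length →
      (((PySem.List.pyRange (j : Int) (nums.length : Int) 1).foldl (aStep nums k x)
        (freq, ans, 0))).2.1 = ans := by
  intro d
  induction d with
  | zero =>
    intro j freq ans hj
    have : j = nums.length := by omega
    subst this
    rw [PySem.List.pyRange_one_eq_nil (le_refl _)]
    rfl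
  | succ d ih =>
    intro j freq ans hj
    have hjlt : (j : Int) < (nums.length : Int) := by exact_mod_cast (by omega : j < nums.length)
    rw [PySem.List.pyRange_one_cons hjlt]
    rw [List.foldl_cons]
    simp only [aStep]
    rw [if_neg (by omega : ¬ ((j : Int) - 0 + 1 ≥ k))]
    have happ := ih (j + 1)
      (if PySem.List.pyGetD nums ((j : Nat) : Int) 0 < 0 then
        bumpA freq |PySem.List.pyGetD nums ((j : Nat) : Int) 0| 1 else freq) ans (by omega)
    rw [show (((j + 1 : Nat)) : Int) = (j : Int) + 1 from by push_cast; ring] at happ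
    exact happ

theorem alt_eq_map (nums : List Int) (k x : Int) :
    getSubarrayBeauty_alt nums k x =
      (PySem.List.pyRange 0 ((nums.length : Int) - k + 1) 1).map
        (fun s => winVal x (PySem.List.slice nums (some s) (some (s + k)))) := by
  unfold getSubarrayBeauty_alt
  rw [PySem.List.foldl_append_singleton_eq_map]
  rfl

-- ===== VERDICT (by name: the statement is the Claim_ definition above) =====
theorem getSubarrayBeauty_spec : Claim_unchanged_getSubarrayBeauty := by
  intro nums k x _hdom hpre hnd
  obtain ⟨hneg, hk⟩ := hpre
  rw [alt_eq_map]
  unfold getSubarrayBeauty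
  by_cases hx : 1 ≤ x
  · have h0 := loopA_spec nums k x hneg hk hx nums.length 0 0 [] (by simp)
      (by simp; omega)
    simpa using h0
  · have hnk : (nums.length : Int) < k := by
      unfold D_getSubarrayBeauty at hnd
      omega
    rw [PySem.List.pyRange_one_eq_nil (by omega : (nums.length : Int) - k + 1 ≤ 0)]
    have h0 := loopA_notfull nums k x hnk nums.length 0 (List.replicate 51 0) [] (by omega)
    simpa using h0

theorem getSubarrayBeauty_changed : Claim_changed_getSubarrayBeauty := by
  unfold Claim_changed_getSubarrayBeauty
  decide

theorem getSubarrayBeauty_tight : Claim_exact_getSubarrayBeauty := by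
  intro nums k x _hdom hpre hD
  obtain ⟨hneg, hk⟩ := hpre
  obtain ⟨hx0, hk1, hkn⟩ := hD
  have hA : getSubarrayBeauty nums k x =
      (PySem.List.pyRange 0 ((nums.length : Int) - k + 1) 1).map (fun _ => (-50 : Int)) := by
    unfold getSubarrayBeauty
    have h0 := loopA_spec_xneg nums k x hneg hk hx0 nums.length 0 0 [] (by simp)
      (by simp; omega)
    simpa using h0
  have hB : getSubarrayBeauty_alt nums k x =
      (PySem.List.pyRange 0 ((nums.length : Int) - k + 1) 1).map (fun _ => (0 : Int)) := by
    rw [alt_eq_map]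
    apply List.map_congr_left
    intro s _
    rw [winVal]
    exact if_neg (by omega)
  rw [hA, hB]
  rw [PySem.List.pyRange_one_cons (by omega : (0 : Int) < (nums.length : Int) - k + 1)]
  simp
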